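-- pv_equiv track=rewrite | github.com/bvramanareddy/SDET--python-interview-questions | PythonInterviewPrograms/StringRepeatingNextToChar.py | printTheSameCharacterNextToLetter
-- ===== SOURCE A (Python) =====
-- def printTheSameCharacterNextToLetter(string):
--     res_list = []
--     unique= set()
--
--     for char in string:
--         res_list.append(char)
--         if char in unique:
--             res_list.append(char)
--         unique.add(char)
--         res_list.append(char)
--
--     return ''.join(res_list)
-- ===== SOURCE B (Python) =====
-- def printTheSameCharacterNextToLetter(string):
--     first = {}
--     for i, ch in enumerate(string):
--         first.setdefault(ch, i)
--     return ''.join(ch * 2 if first[ch] == i else ch * 3 for i, ch in enumerate(string))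
-- ===== Notes on version B (the rewrite author's own statement) =====
-- stated objective: alternative
-- what changed: Replaces the incrementally grown membership set and triple-append loop by a precomputed first-occurrence index table (one setdefault pass) followed by a single join over enumerate that emits c*2 at a character's first occurrence and c*3 later.
import Mathlib
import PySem

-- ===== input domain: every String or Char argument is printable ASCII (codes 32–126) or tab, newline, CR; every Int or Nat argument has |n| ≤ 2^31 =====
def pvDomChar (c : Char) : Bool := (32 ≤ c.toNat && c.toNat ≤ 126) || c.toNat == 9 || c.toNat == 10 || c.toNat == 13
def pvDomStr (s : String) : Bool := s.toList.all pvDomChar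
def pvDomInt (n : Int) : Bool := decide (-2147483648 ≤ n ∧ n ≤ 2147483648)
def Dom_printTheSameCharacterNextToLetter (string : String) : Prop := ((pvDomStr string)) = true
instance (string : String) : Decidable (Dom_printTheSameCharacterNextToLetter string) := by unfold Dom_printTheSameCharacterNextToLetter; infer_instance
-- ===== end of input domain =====

-- B replaces A's incrementally grown membership set by a precomputed first-occurrence index table
-- (setdefault pass) plus a single join over enumerate; alternative decomposition, same cost.


-- ===== PORT A =====
def printTheSameCharacterNextToLetter (string : String) : String :=
  let st := string.toList.foldl
    (fun (st : List Char × PySem.Set Char) char =>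
      let res := st.1 ++ [char]
      let res := if PySem.Set.contains st.2 char then res ++ [char] else res
      let uniq := PySem.Set.add st.2 char
      (res ++ [char], uniq))
    ([], PySem.Set.empty)
  String.ofList st.1

-- ===== PORT B =====
def printTheSameCharacterNextToLetter_alt (string : String) : String :=
  let first := (PySem.List.enumerate string.toList 0).foldl
    (fun (d : PySem.Dict Char Int) p => d.setdefault p.2 p.1) PySem.Dict.empty
  String.ofList ((PySem.List.enumerate string.toList 0).flatMap
    (fun p => if first.getD p.2 0 == p.1 then [p.2, p.2] else [p.2, p.2, p.2]))

-- ===== PRECONDITION & SPEC =====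
def Spec_printTheSameCharacterNextToLetter (string : String) (out : String) : Prop := out = printTheSameCharacterNextToLetter_alt string
instance (string : String) (out : String) : Decidable (Spec_printTheSameCharacterNextToLetter string out) := by unfold Spec_printTheSameCharacterNextToLetter; infer_instance

-- ===== CLAIM (what is proved, stated in full; the proofs are below) =====
def Claim_equal_printTheSameCharacterNextToLetter : Prop := ∀ (string : String), Dom_printTheSameCharacterNextToLetter string → Spec_printTheSameCharacterNextToLetter string (printTheSameCharacterNextToLetter string)

-- ===== LEMMAS AND PROOFS =====

-- Canonical form: double a character at its first occurrence, triple it later; p is the processed prefix.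
def pvSpecAux : List Char → List Char → List Char
  | [], _ => []
  | c :: r, p => (if c ∈ p then [c, c, c] else [c, c]) ++ pvSpecAux r (p ++ [c])

-- A's loop computes pvSpecAux.
theorem pvA_loop (r : List Char) (acc p : List Char) :
    (r.foldl
      (fun (st : List Char × PySem.Set Char) char =>
        let res := st.1 ++ [char]
        let res := if PySem.Set.contains st.2 char then res ++ [char] else res
        let uniq := PySem.Set.add st.2 char
        (res ++ [char], uniq))
      (acc, PySem.Set.ofList p)).1 = acc ++ pvSpecAux r p := by
  induction r generalizing acc p with
  | nil => simp [pvSpecAux]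
  | cons c r ih =>
    have hset : PySem.Set.add (PySem.Set.ofList p) c = PySem.Set.ofList (p ++ [c]) := by
      simp [PySem.Set.ofList_eq_foldl, List.foldl_append]
    have hc : PySem.Set.contains (PySem.Set.ofList p) c = decide (c ∈ p) := by
      simp [pysem]
    simp only [List.foldl_cons, hset, hc, pvSpecAux]
    rw [ih]
    by_cases h : c ∈ p <;> simp [h]

-- The setdefault fold: the first binding of a key wins, later pairs are ignored.
theorem pvFirst_get (l : List Char) (s : Int) (d : PySem.Dict Char Int) (c : Char) :
    ((PySem.List.enumerate l s).foldl
      (fun (d : PySem.Dict Char Int) p => d.setdefault p.2 p.1) d).get? c =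
      (match d.get? c with
       | some v => some v
       | none => (PySem.List.index? l c).map (fun n : Nat => s + (n : Int))) := by
  induction l generalizing s d with
  | nil =>
    cases hdc : d.get? c <;>
      simp [PySem.List.enumerate_nil, hdc, PySem.List.index?, List.idxOf?]
  | cons x r ih =>
    rw [PySem.List.enumerate_cons]
    simp only [List.foldl_cons]
    rw [ih]
    by_cases hx : (d.get? x).isSome
    · have hcont : d.contains x = true := by
        rw [PySem.Dict.contains_eq_isSome_get?]; exact hx
      rw [PySem.Dict.setdefault_of_contains _ _ hcont]
      by_cases hcx : c = x
      · subst hcx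
        obtain ⟨v, hv⟩ := Option.isSome_iff_exists.mp hx
        simp [hv]
      · cases hdc : d.get? c with
        | some v => simp
        | none =>
          have hxc : x ≠ c := fun hh => hcx hh.symm
          rw [PySem.List.index?_cons_of_ne _ hxc]
          cases PySem.List.index? r c <;> simp
          ring_nf
    · have hcont : d.contains x = false := by
        rw [PySem.Dict.contains_eq_isSome_get?]; simpa using hx
      rw [PySem.Dict.setdefault_of_not_contains _ _ hcont]
      have hdx : d.get? x = none := by simpa using hx
      by_cases hcx : c = x
      · subst hcx
        rw [PySem.Dict.get?_insert_self, hdx, PySem.List.index?_cons_self]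
        simp
      · rw [PySem.Dict.get?_insert_of_ne _ _ hcx]
        cases hdc : d.get? c with
        | some v => simp
        | none =>
          have hxc : x ≠ c := fun hh => hcx hh.symm
          rw [PySem.List.index?_cons_of_ne _ hxc]
          cases PySem.List.index? r c <;> simp
          ring_nf

-- The test 'first[c] == i' at absolute position p.length of p ++ c :: r holds iff c is new.
theorem pvCond (p r : List Char) (c : Char) :
    (((PySem.List.enumerate (p ++ c :: r) 0).foldl
        (fun (d : PySem.Dict Char Int) q => d.setdefault q.2 q.1) PySem.Dict.empty).getD c 0
      == (p.length : Int)) = decide (c ∉ p) := by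
  rw [PySem.Dict.getD_eq_get?_getD, pvFirst_get]
  simp only [PySem.Dict.get?_empty]
  by_cases h : c ∈ p
  · have hidx := PySem.List.index?_append_of_mem (c :: r) h
    obtain ⟨k, hk⟩ := Option.isSome_iff_exists.mp ((PySem.List.index?_isSome_iff _ _).mpr h)
    obtain ⟨hlt, -, -⟩ := PySem.List.getElem_of_index?_eq_some hk
    rw [hidx, hk]
    simp [h]
    omega
  · have hidx : PySem.List.index? (p ++ c :: r) c = some p.length :=
      (PySem.List.index?_eq_some_iff _ _ _).mpr ⟨p, r, rfl, rfl, h⟩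
    rw [hidx]
    simp [h]

-- B's second pass computes pvSpecAux, suffix by suffix.
theorem pvB_loop (l p r : List Char) (h : l = p ++ r) :
    (PySem.List.enumerate r (p.length : Int)).flatMap
      (fun q => if ((PySem.List.enumerate l 0).foldl
          (fun (d : PySem.Dict Char Int) q => d.setdefault q.2 q.1) PySem.Dict.empty).getD q.2 0
          == q.1 then [q.2, q.2] else [q.2, q.2, q.2])
      = pvSpecAux r p := by
  induction r generalizing p with
  | nil => simp [pvSpecAux]
  | cons c r ih =>
    rw [PySem.List.enumerate_cons]
    simp only [List.flatMap_cons, pvSpecAux]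
    have hcond : (((PySem.List.enumerate l 0).foldl
        (fun (d : PySem.Dict Char Int) q => d.setdefault q.2 q.1) PySem.Dict.empty).getD c 0
        == (p.length : Int)) = decide (c ∉ p) := by
      rw [h]; exact pvCond p r c
    rw [hcond]
    have hp : ((p.length : Int) + 1) = (((p ++ [c]).length : Int)) := by simp
    rw [hp, ih (p ++ [c]) (by simp [h])]
    by_cases hc : c ∈ p <;> simp [hc]

-- ===== VERDICT (by name: the statement is the Claim_ definition above) =====
theorem printTheSameCharacterNextToLetter_spec : Claim_equal_printTheSameCharacterNextToLetter := by
  intro string _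
  unfold Spec_printTheSameCharacterNextToLetter
  unfold printTheSameCharacterNextToLetter printTheSameCharacterNextToLetter_alt
  have hA := pvA_loop string.toList [] []
  have hB := pvB_loop string.toList [] string.toList rfl
  simp only [List.length_nil, Int.natCast_zero] at hB
  simp only []
  rw [show (PySem.Set.empty : PySem.Set Char) = PySem.Set.ofList [] from rfl, hA, hB]
  simp
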